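-- pv_equiv track=rewrite | github.com/yzhang123/NeMo | examples/nlp/dialogue_state_tracking/multiwoz/create_sgd_dialogs.py | get_domain_actions
-- ===== SOURCE A (Python) =====
-- from typing import List
-- from collections import defaultdict
--
-- def get_domain_actions(domains: List[str], acts: dict) -> dict:
--     """
--         acts: dict over entire dialogue_acts.json
--     """
--     # without bookings
--     domain_to_actions = defaultdict(list)
--     dom_ints = [(x, diag[0]) for diag in acts.items() for turn in diag[1].values() for x in turn]
--     for dom_int, id in dom_ints:
--         try:
--             dom, action = dom_int.lower().split("-")
--         except:
--             continue
--         if dom in domains and action not in domain_to_actions[dom]: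
--             domain_to_actions[dom].append(action)
--     return domain_to_actions
-- ===== SOURCE B (Python) =====
-- from typing import List
-- from collections import defaultdict
--
--
-- def get_domain_actions(domains: List[str], acts: dict) -> dict:
--     # Phase 1: table of ALL actions (duplicates kept) per matching domain,
--     # in appearance order.
--     table = {}
--     for diag_id, turns in acts.items():
--         for turn in turns.values():
--             for dom_int in turn:
--                 try:
--                     dom, action = dom_int.lower().split("-")
--                 except:
--                     continue
--                 if dom in domains:
--                     table.setdefault(dom, []).append(action)
--     # Phase 2: deduplicate each list, preserving first appearance.
--     result = defaultdict(list)
--     for dom, actions in table.items():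
--         result[dom] = list(dict.fromkeys(actions))
--     return result
-- ===== Notes on version B (the rewrite author's own statement) =====
-- stated objective: alternative
-- what changed: A flattens the nested dicts into one (dom_int, id) list and dedups inline with a membership test against the growing result; B streams the nested dicts directly in two phases: it first collects all matching actions per domain (duplicates kept) with setdefault, then deduplicates each domain's list with dict.fromkeys when building the result.
import Mathlib
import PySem

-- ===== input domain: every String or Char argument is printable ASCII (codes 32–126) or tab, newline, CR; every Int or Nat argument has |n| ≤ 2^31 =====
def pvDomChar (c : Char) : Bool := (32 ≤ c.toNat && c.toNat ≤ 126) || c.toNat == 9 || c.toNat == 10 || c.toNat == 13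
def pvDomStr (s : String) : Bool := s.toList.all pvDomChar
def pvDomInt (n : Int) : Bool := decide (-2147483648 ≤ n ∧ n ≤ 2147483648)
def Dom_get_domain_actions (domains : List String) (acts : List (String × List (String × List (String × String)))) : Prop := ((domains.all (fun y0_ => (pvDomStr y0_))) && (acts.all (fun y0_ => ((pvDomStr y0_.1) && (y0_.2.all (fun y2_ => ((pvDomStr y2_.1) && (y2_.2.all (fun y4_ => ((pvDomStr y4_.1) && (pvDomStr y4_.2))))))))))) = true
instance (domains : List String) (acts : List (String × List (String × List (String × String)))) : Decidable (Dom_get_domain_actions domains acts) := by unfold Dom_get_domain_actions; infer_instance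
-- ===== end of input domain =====

-- B replaces A's flatten-then-inline-membership-dedup pass by two phases: nested folds that
-- collect every matching action per domain (duplicates kept), then a per-domain first-occurrence
-- dedup when building the result (objective: alternative decomposition, same observable value).


-- ===== PORT A =====
-- defaultdict access + conditional append: d[dom] is created (empty) on access; the action is
-- appended iff not already present.
def pvUpdA (d : List (String × List String)) (dom action : String) : List (String × List String) :=
  match d with
  | [] => [(dom, [action])]
  | (k, v) :: rest =>
      if k = dom then
        (if action ∈ v then (k, v) :: rest else (k, v ++ [action]) :: rest)
      else (k, v) :: pvUpdA rest dom action

def get_domain_actions (domains : List String) (acts : List (String × List (String × List (String × String)))) : List (String × List String) :=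
  let dom_ints : List (String × String) :=
    acts.flatMap (fun diag =>
      (diag.2.map Prod.snd).flatMap (fun turn =>
        (turn.map Prod.fst).map (fun x => (x, diag.1))))
  dom_ints.foldl (fun d p =>
    match PySem.Str.split? (PySem.Str.lower p.1) "-" with
    | some [dom, action] => if dom ∈ domains then pvUpdA d dom action else d
    | _ => d) []   -- any other number of pieces: unpacking raises, `except: continue`

-- ===== PORT B =====
-- table.setdefault(dom, []).append(action): unconditional append, key created on first use.
def pvSetdefApp (t : List (String × List String)) (dom action : String) : List (String × List String) :=
  match t with
  | [] => [(dom, [action])]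
  | (k, v) :: rest =>
      if k = dom then (k, v ++ [action]) :: rest
      else (k, v) :: pvSetdefApp rest dom action

-- dom, action = dom_int.lower().split("-"); except: None (any other piece count)
def pvParse (x : String) : Option (String × String) :=
  let parts := (PySem.Str.split? (PySem.Str.lower x) "-").getD []
  if h : parts.length = 2 then some (parts[0], parts[1]) else none

-- list(dict.fromkeys(l)): first-occurrence-preserving dedup
def pvFromkeys (l : List String) : List String :=
  l.foldl (fun acc a => if a ∈ acc then acc else acc ++ [a]) []

def get_domain_actions_alt (domains : List String) (acts : List (String × List (String × List (String × String)))) : List (String × List String) :=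
  let table : List (String × List String) :=
    acts.foldl (fun t diag =>
      diag.2.foldl (fun t turnkv =>
        turnkv.2.foldl (fun t kv =>
          match pvParse kv.1 with
          | some (dom, action) => if dom ∈ domains then pvSetdefApp t dom action else t
          | none => t) t) t) []
  table.map (fun kv => (kv.1, pvFromkeys kv.2))

-- ===== PRECONDITION & SPEC =====
def Spec_get_domain_actions (domains : List String) (acts : List (String × List (String × List (String × String)))) (out : List (String × List String)) : Prop := out = get_domain_actions_alt domains acts
instance (domains : List String) (acts : List (String × List (String × List (String × String)))) (out : List (String × List String)) : Decidable (Spec_get_domain_actions domains acts out) := by unfold Spec_get_domain_actions; infer_instance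

-- ===== CLAIM (what is proved, stated in full; the proofs are below) =====
def Claim_equal_get_domain_actions : Prop := ∀ (domains : List String) (acts : List (String × List (String × List (String × String)))), Dom_get_domain_actions domains acts → Spec_get_domain_actions domains acts (get_domain_actions domains acts)

-- ===== LEMMAS AND PROOFS =====

-- the simulation map: B's raw table is projected to A's deduped state
def pvF (kv : String × List String) : String × List String := (kv.1, pvFromkeys kv.2)

theorem pvFromkeys_concat (l : List String) (a : String) :
    pvFromkeys (l ++ [a]) = if a ∈ pvFromkeys l then pvFromkeys l else pvFromkeys l ++ [a] := by
  simp [pvFromkeys, List.foldl_append]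

theorem pvUpd_sim (t : List (String × List String)) (dom action : String) :
    (pvSetdefApp t dom action).map pvF = pvUpdA (t.map pvF) dom action := by
  induction t with
  | nil => simp [pvSetdefApp, pvUpdA, pvF, pvFromkeys]
  | cons kv rest ih =>
      obtain ⟨k, v⟩ := kv
      by_cases hk : k = dom
      · simp [pvSetdefApp, pvUpdA, pvF, hk, pvFromkeys_concat]
        split <;> simp
      · simp [pvSetdefApp, pvUpdA, pvF, hk, ih]

-- one item (a dom_int string) advances both sides in lock-step
def pvStepA (domains : List String) (d : List (String × List String)) (x : String) : List (String × List String) :=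
  match PySem.Str.split? (PySem.Str.lower x) "-" with
  | some [dom, action] => if dom ∈ domains then pvUpdA d dom action else d
  | _ => d

def pvStepB (domains : List String) (t : List (String × List String)) (x : String) : List (String × List String) :=
  match pvParse x with
  | some (dom, action) => if dom ∈ domains then pvSetdefApp t dom action else t
  | none => t

theorem pvStep_sim (domains : List String) (t : List (String × List String)) (x : String) :
    (pvStepB domains t x).map pvF = pvStepA domains (t.map pvF) x := by
  unfold pvStepA pvStepB
  rcases hs : PySem.Str.split? (PySem.Str.lower x) "-" with _ | l
  · simp [pvParse, hs]
  · rcases l with _ | ⟨a, _ | ⟨b, _ | ⟨c, l⟩⟩⟩ <;> simp [pvParse, hs]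
    by_cases h : a ∈ domains <;> simp [h, pvUpd_sim]

theorem pvFold_turn (domains : List String) (id : String) (turn : List (String × String))
    (t : List (String × List String)) :
    (turn.foldl (fun t kv => pvStepB domains t kv.1) t).map pvF =
    ((turn.map Prod.fst).map (fun x => (x, id))).foldl (fun d p => pvStepA domains d p.1) (t.map pvF) := by
  induction turn generalizing t with
  | nil => rfl
  | cons kv kvs ih =>
      simp only [List.map_cons, List.foldl_cons]
      rw [← pvStep_sim, ih]

theorem pvFold_diag (domains : List String) (id : String)
    (turns : List (String × List (String × String))) (t : List (String × List String)) :
    (turns.foldl (fun t turnkv => turnkv.2.foldl (fun t kv => pvStepB domains t kv.1) t) t).map pvF =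
    ((turns.map Prod.snd).flatMap (fun turn => (turn.map Prod.fst).map (fun x => (x, id)))).foldl
      (fun d p => pvStepA domains d p.1) (t.map pvF) := by
  induction turns generalizing t with
  | nil => rfl
  | cons turnkv rest ih =>
      simp only [List.map_cons, List.flatMap_cons, List.foldl_cons, List.foldl_append]
      rw [ih, pvFold_turn]

theorem pvFold_acts (domains : List String)
    (acts : List (String × List (String × List (String × String)))) (t : List (String × List String)) :
    (acts.foldl (fun t diag => diag.2.foldl (fun t turnkv => turnkv.2.foldl (fun t kv => pvStepB domains t kv.1) t) t) t).map pvF =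
    (acts.flatMap (fun diag => (diag.2.map Prod.snd).flatMap (fun turn => (turn.map Prod.fst).map (fun x => (x, diag.1))))).foldl
      (fun d p => pvStepA domains d p.1) (t.map pvF) := by
  induction acts generalizing t with
  | nil => rfl
  | cons diag rest ih =>
      simp only [List.flatMap_cons, List.foldl_cons, List.foldl_append]
      rw [ih, pvFold_diag]

theorem pv_main (domains : List String) (acts : List (String × List (String × List (String × String)))) :
    get_domain_actions domains acts = get_domain_actions_alt domains acts := by
  have h := pvFold_acts domains acts []
  simp only [List.map_nil] at h
  exact h.symm

-- ===== VERDICT (by name: the statement is the Claim_ definition above) =====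
theorem get_domain_actions_spec : Claim_equal_get_domain_actions := by
  intro domains acts _
  unfold Spec_get_domain_actions
  exact pv_main domains acts
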